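-- pv_equiv track=rewrite | github.com/mustafakutay/3AP-in-Subsets-of-Z_N | 3AP_counter_Sp^2.py | brute_force_3AP_count
-- ===== SOURCE A (Python) =====
-- def brute_force_3AP_count(S, mod):
--     """
--     This counts the number of 3-term arithmetic progressions among ordered triples (x,y,z) in a given set S,
--     where each triple is counted individually. The element x,y,z must be distinct and satisfy
--     the condition of forming an arithmetic progression.
--     """
--     count = 0
--     n = len(S)
--     for i in range(n):
--         for j in range(n):
--             if j == i:
--                 continue
--             for k in range(n):
--                 if k == i or k == j:
--                     continue
--                 x = S[i]
--                 y = S[j]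
--                 z = S[k]
--                 if (y - x) % mod == (z - y) % mod:
--                     count += 1
--     return count
-- ===== SOURCE B (Python) =====
-- def brute_force_3AP_count(S, mod):
--     """Residue-frequency counting: x,y,z (distinct positions) form a 3AP mod `mod`
--     iff x + z == 2*y (mod mod); count pairs per middle via a residue counter,
--     then correct for the coincident-position cases by inclusion-exclusion."""
--     res = [x % mod for x in S]
--     cnt = {}
--     for r in res:
--         cnt[r] = cnt.get(r, 0) + 1
--     dcnt = {}
--     for x in S:
--         d = (2 * x) % mod
--         dcnt[d] = dcnt.get(d, 0) + 1
--     total = 0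
--     for y in S:
--         t = (2 * y) % mod
--         pairs = sum(cnt.get((t - r) % mod, 0) for r in res)
--         total += pairs - 2 * cnt[y % mod] - dcnt.get(t, 0) + 2
--     return total
-- ===== Notes on version B (the rewrite author's own statement) =====
-- stated objective: faster
-- what changed: A enumerates all ordered index triples (O(n^3)); B builds residue-frequency dictionaries once and, per middle element, counts pairs x+z = 2y (mod m) from the table, subtracting the coincident-position cases (k=i, k=j, i=j) by inclusion-exclusion.
-- outside the precondition, e.g. on brute_force_3AP_count([1, 2], 0): A returns 0, B raises ZeroDivisionError
import Mathlib
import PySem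

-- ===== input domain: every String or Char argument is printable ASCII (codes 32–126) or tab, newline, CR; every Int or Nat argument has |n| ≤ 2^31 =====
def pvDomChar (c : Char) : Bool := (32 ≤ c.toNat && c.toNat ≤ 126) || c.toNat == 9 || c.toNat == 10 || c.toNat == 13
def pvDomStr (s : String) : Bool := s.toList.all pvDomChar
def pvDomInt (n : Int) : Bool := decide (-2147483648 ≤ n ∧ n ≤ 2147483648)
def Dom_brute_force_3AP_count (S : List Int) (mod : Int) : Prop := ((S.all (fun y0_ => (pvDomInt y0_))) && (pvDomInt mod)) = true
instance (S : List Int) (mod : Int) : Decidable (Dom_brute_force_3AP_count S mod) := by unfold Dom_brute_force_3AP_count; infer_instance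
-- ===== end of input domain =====

-- B replaces A's cubic scan over index triples by a residue-frequency table with an
-- inclusion-exclusion correction for coincident positions (objective: faster).

-- ===== PORT A =====
def brute_force_3AP_count (S : List Int) (mod : Int) : Int :=
  let n : Int := S.length
  (PySem.List.pyRange 0 n 1).foldl (fun count i =>
    (PySem.List.pyRange 0 n 1).foldl (fun count j =>
      if j = i then count else
      (PySem.List.pyRange 0 n 1).foldl (fun count k =>
        if k = i ∨ k = j then count else
        let x := PySem.List.pyGetD S i 0
        let y := PySem.List.pyGetD S j 0
        let z := PySem.List.pyGetD S k 0
        if PySem.Int.mod (y - x) mod = PySem.Int.mod (z - y) mod then count + 1 else count)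
        count) count) 0

-- ===== PORT B =====
def brute_force_3AP_count_alt (S : List Int) (mod : Int) : Int :=
  let res := S.map (fun x => PySem.Int.mod x mod)
  let cnt := res.foldl (fun (d : PySem.Dict Int Int) r => d.insert r (d.getD r 0 + 1)) PySem.Dict.empty
  let dcnt := S.foldl (fun (d : PySem.Dict Int Int) x =>
      let dd := PySem.Int.mod (2 * x) mod
      d.insert dd (d.getD dd 0 + 1)) PySem.Dict.empty
  S.foldl (fun total y =>
    let t := PySem.Int.mod (2 * y) mod
    let pairs := (res.map (fun r => cnt.getD (PySem.Int.mod (t - r) mod) 0)).sum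
    total + (pairs - 2 * cnt.getD (PySem.Int.mod y mod) 0 - dcnt.getD t 0 + 2)) 0

-- ===== PRECONDITION & SPEC =====
-- Pre_ excludes mod = 0, where Python's '%' raises ZeroDivisionError: A raises whenever
-- len(S) >= 3 and returns only the degenerate 0 on shorter lists, while B raises on any
-- nonempty S.
def Pre_brute_force_3AP_count (_S : List Int) (mod : Int) : Prop := mod ≠ 0
instance (S : List Int) (mod : Int) : Decidable (Pre_brute_force_3AP_count S mod) := by unfold Pre_brute_force_3AP_count; infer_instance
def pvWitness_brute_force_3AP_count : List Int × Int := ([0, 1, 2, 4], 5)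

def Spec_brute_force_3AP_count (S : List Int) (mod : Int) (out : Int) : Prop := out = brute_force_3AP_count_alt S mod
instance (S : List Int) (mod : Int) (out : Int) : Decidable (Spec_brute_force_3AP_count S mod out) := by unfold Spec_brute_force_3AP_count; infer_instance

-- ===== CLAIM (what is proved, stated in full; the proofs are below) =====
def Claim_equal_brute_force_3AP_count : Prop := ∀ (S : List Int) (mod : Int), Dom_brute_force_3AP_count S mod → Pre_brute_force_3AP_count S mod → Spec_brute_force_3AP_count S mod (brute_force_3AP_count S mod)

-- ===== LEMMAS AND PROOFS =====

theorem pv_dvd_sub_mod (a m : Int) : m ∣ (a - PySem.Int.mod a m) := by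
  have h := PySem.Int.floordiv_mul_add_mod a m
  exact ⟨PySem.Int.floordiv a m, by linarith⟩

theorem pv_mod_eq_mod_iff (a b m : Int) (hm : m ≠ 0) :
    PySem.Int.mod a m = PySem.Int.mod b m ↔ m ∣ (a - b) := by
  constructor
  · intro h
    have h1 := pv_dvd_sub_mod a m
    have h2 := pv_dvd_sub_mod b m
    have := dvd_sub h1 h2
    rw [h] at this
    simpa using this
  · intro hd
    have h1 := pv_dvd_sub_mod a m
    have h2 := pv_dvd_sub_mod b m
    have hdd : m ∣ (PySem.Int.mod a m - PySem.Int.mod b m) := by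
      have := dvd_sub (dvd_sub hd h1) (dvd_neg.mpr h2)
      have e : a - b - (a - PySem.Int.mod a m) - -(b - PySem.Int.mod b m)
          = PySem.Int.mod a m - PySem.Int.mod b m := by ring
      rwa [e] at this
    have habs : |PySem.Int.mod a m - PySem.Int.mod b m| < |m| := by
      rcases lt_or_gt_of_ne hm with hneg | hpos
      · have ba := PySem.Int.mod_neg_bounds a hneg
        have bb := PySem.Int.mod_neg_bounds b hneg
        rcases abs_cases (PySem.Int.mod a m - PySem.Int.mod b m) with ⟨e,_⟩|⟨e,_⟩ <;>
          rcases abs_cases m with ⟨e2,_⟩|⟨e2,_⟩ <;> omega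
      · have ba := And.intro (PySem.Int.mod_nonneg a hpos) (PySem.Int.mod_lt a hpos)
        have bb := And.intro (PySem.Int.mod_nonneg b hpos) (PySem.Int.mod_lt b hpos)
        rcases abs_cases (PySem.Int.mod a m - PySem.Int.mod b m) with ⟨e,_⟩|⟨e,_⟩ <;>
          rcases abs_cases m with ⟨e2,_⟩|⟨e2,_⟩ <;> omega
    rcases hdd with ⟨c, hc⟩
    rw [hc, abs_mul] at habs
    have hm0 : 0 < |m| := abs_pos.mpr hm
    have hc0 : |c| = 0 := by nlinarith [abs_nonneg c]
    rw [abs_eq_zero.mp hc0, mul_zero] at hc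
    linarith

theorem pv_count_eq_sum (l : List Int) (v : Int) :
    ((l.count v : Nat) : Int) = ∑ k ∈ Finset.range l.length, (if l.getD k 0 = v then (1 : Int) else 0) := by
  induction l with
  | nil => simp
  | cons x t ih =>
    rw [List.length_cons, Finset.sum_range_succ']
    simp only [List.getD_cons_succ, List.getD_cons_zero]
    rw [← ih, List.count_cons]
    by_cases h : x = v
    · simp only [h, beq_self_eq_true, if_true]
      push_cast; ring
    · rw [if_neg h, if_neg (by simp [h])]
      push_cast; ring

theorem pv_sum_map_eq_sum (l : List Int) (f : Int → Int) :
    (l.map f).sum = ∑ k ∈ Finset.range l.length, f (l.getD k 0) := by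
  induction l with
  | nil => simp
  | cons x t ih =>
    rw [List.length_cons, Finset.sum_range_succ']
    simp only [List.getD_cons_succ, List.getD_cons_zero, List.map_cons, List.sum_cons]
    rw [ih]; ring

theorem pv_getD_map (S : List Int) (f : Int → Int) (k : Nat) (h : k < S.length) :
    (S.map f).getD k 0 = f (S.getD k 0) := by
  simp [List.getD, h]

theorem pv_sum_map_pyRange (n : Nat) (f : Int → Int) :
    ((PySem.List.pyRange 0 (n : Int) 1).map f).sum = ∑ k ∈ Finset.range n, f (k : Int) := by
  rw [PySem.List.pyRange_one]
  simp only [Int.sub_zero, Int.toNat_natCast, List.map_map]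
  have : ((List.range n).map (fun k : Nat => f ((0 : Int) + k))).sum
      = ∑ k ∈ Finset.range n, f ((0 : Int) + k) := rfl
  simpa using this

theorem pv_A_sum (S : List Int) (m : Int) :
    brute_force_3AP_count S m
      = ∑ i ∈ Finset.range S.length, ∑ jj ∈ Finset.range S.length,
          (if (jj : Int) = (i : Int) then 0 else
            ∑ k ∈ Finset.range S.length,
              (if (k : Int) = (i : Int) ∨ (k : Int) = (jj : Int) then 0 else
                if PySem.Int.mod (PySem.List.pyGetD S jj 0 - PySem.List.pyGetD S i 0) m
                    = PySem.Int.mod (PySem.List.pyGetD S k 0 - PySem.List.pyGetD S jj 0) m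
                then 1 else 0)) := by
  have step1 : ∀ (i jj a : Int),
      (PySem.List.pyRange 0 (S.length : Int) 1).foldl (fun count k =>
        if k = i ∨ k = jj then count else
        if PySem.Int.mod (PySem.List.pyGetD S jj 0 - PySem.List.pyGetD S i 0) m
            = PySem.Int.mod (PySem.List.pyGetD S k 0 - PySem.List.pyGetD S jj 0) m
        then count + 1 else count) a
      = a + ((PySem.List.pyRange 0 (S.length : Int) 1).map (fun k =>
          if k = i ∨ k = jj then (0 : Int) else
          if PySem.Int.mod (PySem.List.pyGetD S jj 0 - PySem.List.pyGetD S i 0) m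
              = PySem.Int.mod (PySem.List.pyGetD S k 0 - PySem.List.pyGetD S jj 0) m
          then 1 else 0)).sum := by
    intro i jj a
    rw [PySem.List.foldl_congr_mem _ _ (fun count k =>
        count + (if k = i ∨ k = jj then (0 : Int) else
          if PySem.Int.mod (PySem.List.pyGetD S jj 0 - PySem.List.pyGetD S i 0) m
              = PySem.Int.mod (PySem.List.pyGetD S k 0 - PySem.List.pyGetD S jj 0) m
          then 1 else 0)) a
      (by intro acc k _; beta_reduce; split_ifs <;> omega)]
    exact PySem.List.foldl_add _ _ _
  have step2 : ∀ (i a : Int),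
      (PySem.List.pyRange 0 (S.length : Int) 1).foldl (fun count jj =>
        if jj = i then count else
        (PySem.List.pyRange 0 (S.length : Int) 1).foldl (fun count k =>
          if k = i ∨ k = jj then count else
          if PySem.Int.mod (PySem.List.pyGetD S jj 0 - PySem.List.pyGetD S i 0) m
              = PySem.Int.mod (PySem.List.pyGetD S k 0 - PySem.List.pyGetD S jj 0) m
          then count + 1 else count) count) a
      = a + ((PySem.List.pyRange 0 (S.length : Int) 1).map (fun jj =>
          if jj = i then (0 : Int) else
          ((PySem.List.pyRange 0 (S.length : Int) 1).map (fun k =>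
            if k = i ∨ k = jj then (0 : Int) else
            if PySem.Int.mod (PySem.List.pyGetD S jj 0 - PySem.List.pyGetD S i 0) m
                = PySem.Int.mod (PySem.List.pyGetD S k 0 - PySem.List.pyGetD S jj 0) m
            then 1 else 0)).sum)).sum := by
    intro i a
    rw [PySem.List.foldl_congr_mem _ _ (fun count jj =>
        count + (if jj = i then (0 : Int) else
          ((PySem.List.pyRange 0 (S.length : Int) 1).map (fun k =>
            if k = i ∨ k = jj then (0 : Int) else
            if PySem.Int.mod (PySem.List.pyGetD S jj 0 - PySem.List.pyGetD S i 0) m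
                = PySem.Int.mod (PySem.List.pyGetD S k 0 - PySem.List.pyGetD S jj 0) m
            then 1 else 0)).sum)) a
      (by
        intro acc jj _
        beta_reduce
        by_cases h : jj = i
        · rw [if_pos h, if_pos h, add_zero]
        · rw [if_neg h, if_neg h, step1])]
    exact PySem.List.foldl_add _ _ _
  have hdef : brute_force_3AP_count S m
      = (PySem.List.pyRange 0 (S.length : Int) 1).foldl (fun count i =>
          (PySem.List.pyRange 0 (S.length : Int) 1).foldl (fun count jj =>
            if jj = i then count else
            (PySem.List.pyRange 0 (S.length : Int) 1).foldl (fun count k =>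
              if k = i ∨ k = jj then count else
              if PySem.Int.mod (PySem.List.pyGetD S jj 0 - PySem.List.pyGetD S i 0) m
                  = PySem.Int.mod (PySem.List.pyGetD S k 0 - PySem.List.pyGetD S jj 0) m
              then count + 1 else count) count) count) 0 := rfl
  rw [hdef, PySem.List.foldl_congr_mem _ _ (fun count i =>
      count + ((PySem.List.pyRange 0 (S.length : Int) 1).map (fun jj =>
        if jj = i then (0 : Int) else
        ((PySem.List.pyRange 0 (S.length : Int) 1).map (fun k =>
          if k = i ∨ k = jj then (0 : Int) else
          if PySem.Int.mod (PySem.List.pyGetD S jj 0 - PySem.List.pyGetD S i 0) m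
              = PySem.Int.mod (PySem.List.pyGetD S k 0 - PySem.List.pyGetD S jj 0) m
          then 1 else 0)).sum)).sum) 0
    (by intro acc i _; beta_reduce; rw [step2]), PySem.List.foldl_add, zero_add, pv_sum_map_pyRange]
  refine Finset.sum_congr rfl fun i _ => ?_
  rw [pv_sum_map_pyRange]
  refine Finset.sum_congr rfl fun jj _ => ?_
  by_cases h : (jj : Int) = (i : Int)
  · rw [if_pos h, if_pos h]
  · rw [if_neg h, if_neg h, pv_sum_map_pyRange]

theorem pv_ie (n j : Nat) (hj : j < n) (X : Nat → Nat → Prop)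
    [∀ i k, Decidable (X i k)] (hjj : X j j) :
    (∑ i ∈ Finset.range n, ∑ k ∈ Finset.range n,
        (if i ≠ j ∧ k ≠ i ∧ k ≠ j ∧ X i k then (1 : Int) else 0))
      = (∑ i ∈ Finset.range n, ∑ k ∈ Finset.range n, (if X i k then (1 : Int) else 0))
        - (∑ k ∈ Finset.range n, (if X j k then (1 : Int) else 0))
        - (∑ i ∈ Finset.range n, (if X i j then (1 : Int) else 0))
        - (∑ i ∈ Finset.range n, (if X i i then (1 : Int) else 0)) + 2 := by
  have hinner : ∀ i ∈ Finset.range n,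
      (∑ k ∈ Finset.range n, (if i ≠ j ∧ k ≠ i ∧ k ≠ j ∧ X i k then (1 : Int) else 0))
        = if i = j then 0 else
            (∑ k ∈ Finset.range n, (if X i k then (1 : Int) else 0))
              - (if X i i then (1 : Int) else 0) - (if X i j then (1 : Int) else 0) := by
    intro i hi
    by_cases hij : i = j
    · simp [hij]
    · rw [if_neg hij]
      have hpt : ∀ k ∈ Finset.range n, (if i ≠ j ∧ k ≠ i ∧ k ≠ j ∧ X i k then (1 : Int) else 0)
          = (if X i k then (1 : Int) else 0)
            - (if k = i then (if X i k then (1 : Int) else 0) else 0)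
            - (if k = j then (if X i k then (1 : Int) else 0) else 0) := by
        intro k _
        by_cases h1 : k = i <;> by_cases h2 : k = j <;>
          by_cases h3 : X i k <;> simp_all
      rw [Finset.sum_congr rfl hpt, Finset.sum_sub_distrib, Finset.sum_sub_distrib,
        Finset.sum_ite_eq' (Finset.range n) i, Finset.sum_ite_eq' (Finset.range n) j]
      simp [hi, Finset.mem_range.mpr hj]
  rw [Finset.sum_congr rfl hinner]
  have hpt2 : ∀ i ∈ Finset.range n,
      (if i = j then (0:Int) else
        (∑ k ∈ Finset.range n, (if X i k then (1 : Int) else 0))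
          - (if X i i then (1 : Int) else 0) - (if X i j then (1 : Int) else 0))
      = ((∑ k ∈ Finset.range n, (if X i k then (1 : Int) else 0))
          - (if X i i then (1 : Int) else 0) - (if X i j then (1 : Int) else 0))
        - (if i = j then ((∑ k ∈ Finset.range n, (if X j k then (1 : Int) else 0)) - 2) else 0) := by
    intro i _
    by_cases h : i = j
    · subst h; simp only [if_pos hjj, if_true]; ring
    · simp [h]
  rw [Finset.sum_congr rfl hpt2, Finset.sum_sub_distrib, Finset.sum_sub_distrib,
    Finset.sum_sub_distrib, Finset.sum_ite_eq' (Finset.range n) j]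
  simp only [Finset.mem_range.mpr hj, if_true]
  ring

theorem pv_iff_main (m : Int) (hm : m ≠ 0) (x y z : Int) :
    (PySem.Int.mod (y - x) m = PySem.Int.mod (z - y) m)
      ↔ (PySem.Int.mod z m
          = PySem.Int.mod (PySem.Int.mod (2 * y) m - PySem.Int.mod x m) m) := by
  rw [pv_mod_eq_mod_iff _ _ _ hm, pv_mod_eq_mod_iff _ _ _ hm]
  obtain ⟨q1, e1⟩ := pv_dvd_sub_mod (2 * y) m
  obtain ⟨q2, e2⟩ := pv_dvd_sub_mod x m
  constructor
  · rintro ⟨c, hc⟩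
    exact ⟨-c + q1 - q2, by linear_combination -hc + e1 - e2⟩
  · rintro ⟨c, hc⟩
    exact ⟨-c + q1 - q2, by linear_combination -hc + e1 - e2⟩

theorem pv_iff_mid (m : Int) (hm : m ≠ 0) (y z : Int) :
    (PySem.Int.mod (y - y) m = PySem.Int.mod (z - y) m)
      ↔ (PySem.Int.mod z m = PySem.Int.mod y m) := by
  rw [pv_mod_eq_mod_iff _ _ _ hm, pv_mod_eq_mod_iff _ _ _ hm]
  constructor
  · rintro ⟨c, hc⟩; exact ⟨-c, by linear_combination -hc⟩
  · rintro ⟨c, hc⟩; exact ⟨-c, by linear_combination -hc⟩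

theorem pv_iff_col (m : Int) (hm : m ≠ 0) (x y : Int) :
    (PySem.Int.mod (y - x) m = PySem.Int.mod (y - y) m)
      ↔ (PySem.Int.mod x m = PySem.Int.mod y m) := by
  rw [pv_mod_eq_mod_iff _ _ _ hm, pv_mod_eq_mod_iff _ _ _ hm]
  constructor
  · rintro ⟨c, hc⟩; exact ⟨-c, by linear_combination -hc⟩
  · rintro ⟨c, hc⟩; exact ⟨-c, by linear_combination -hc⟩

theorem pv_iff_diag (m : Int) (hm : m ≠ 0) (x y : Int) :
    (PySem.Int.mod (y - x) m = PySem.Int.mod (x - y) m)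
      ↔ (PySem.Int.mod (2 * x) m = PySem.Int.mod (2 * y) m) := by
  rw [pv_mod_eq_mod_iff _ _ _ hm, pv_mod_eq_mod_iff _ _ _ hm]
  constructor
  · rintro ⟨c, hc⟩; exact ⟨-c, by linear_combination -hc⟩
  · rintro ⟨c, hc⟩; exact ⟨-c, by linear_combination -hc⟩

theorem pv_B_sum (S : List Int) (m : Int) :
    brute_force_3AP_count_alt S m
      = ∑ j ∈ Finset.range S.length,
          ((∑ i ∈ Finset.range S.length,
              (((S.map (fun x => PySem.Int.mod x m)).count
                  (PySem.Int.mod (PySem.Int.mod (2 * S.getD j 0) m - PySem.Int.mod (S.getD i 0) m) m) : Nat) : Int))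
            - 2 * ((S.map (fun x => PySem.Int.mod x m)).count (PySem.Int.mod (S.getD j 0) m) : Int)
            - ((S.map (fun x => PySem.Int.mod (2 * x) m)).count (PySem.Int.mod (2 * S.getD j 0) m) : Int)
            + 2) := by
  have hcnt : ∀ v : Int,
      (((S.map (fun x => PySem.Int.mod x m)).foldl
          (fun (d : PySem.Dict Int Int) r => d.insert r (d.getD r 0 + 1)) PySem.Dict.empty).getD v 0)
        = ((S.map (fun x => PySem.Int.mod x m)).count v : Int) := by
    intro v
    rw [PySem.Dict.getD_foldl_insert_add_one, PySem.Dict.getD_empty, zero_add]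
  have hfold : (S.map (fun x => PySem.Int.mod (2 * x) m)).foldl
        (fun (d : PySem.Dict Int Int) r => d.insert r (d.getD r 0 + 1)) PySem.Dict.empty
      = S.foldl (fun (d : PySem.Dict Int Int) x =>
          d.insert (PySem.Int.mod (2 * x) m) (d.getD (PySem.Int.mod (2 * x) m) 0 + 1)) PySem.Dict.empty :=
    List.foldl_map
  have hdcnt : ∀ v : Int,
      ((S.foldl (fun (d : PySem.Dict Int Int) x =>
          d.insert (PySem.Int.mod (2 * x) m) (d.getD (PySem.Int.mod (2 * x) m) 0 + 1)) PySem.Dict.empty).getD v 0)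
        = ((S.map (fun x => PySem.Int.mod (2 * x) m)).count v : Int) := by
    intro v
    rw [← hfold, PySem.Dict.getD_foldl_insert_add_one, PySem.Dict.getD_empty, zero_add]
  have hdef : brute_force_3AP_count_alt S m
      = S.foldl (fun total y => total +
          (((S.map (fun x => PySem.Int.mod x m)).map (fun rr =>
              ((S.map (fun x => PySem.Int.mod x m)).foldl
                (fun (d : PySem.Dict Int Int) r => d.insert r (d.getD r 0 + 1)) PySem.Dict.empty).getD
                  (PySem.Int.mod (PySem.Int.mod (2 * y) m - rr) m) 0)).sum
            - 2 * ((S.map (fun x => PySem.Int.mod x m)).foldl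
                (fun (d : PySem.Dict Int Int) r => d.insert r (d.getD r 0 + 1)) PySem.Dict.empty).getD
                  (PySem.Int.mod y m) 0
            - (S.foldl (fun (d : PySem.Dict Int Int) x =>
                d.insert (PySem.Int.mod (2 * x) m) (d.getD (PySem.Int.mod (2 * x) m) 0 + 1)) PySem.Dict.empty).getD
                  (PySem.Int.mod (2 * y) m) 0
            + 2)) 0 := rfl
  rw [hdef, PySem.List.foldl_add, zero_add, pv_sum_map_eq_sum]
  refine Finset.sum_congr rfl fun j hj => ?_
  simp only [hcnt, hdcnt]
  rw [pv_sum_map_eq_sum, List.length_map]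
  have hinner : (∑ i ∈ Finset.range S.length,
        (((S.map (fun x => PySem.Int.mod x m)).count
            (PySem.Int.mod (PySem.Int.mod (2 * S.getD j 0) m - (S.map (fun x => PySem.Int.mod x m)).getD i 0) m) : Nat) : Int))
      = ∑ i ∈ Finset.range S.length,
          (((S.map (fun x => PySem.Int.mod x m)).count
              (PySem.Int.mod (PySem.Int.mod (2 * S.getD j 0) m - PySem.Int.mod (S.getD i 0) m) m) : Nat) : Int) := by
    refine Finset.sum_congr rfl fun i hi => ?_
    rw [pv_getD_map S _ i (Finset.mem_range.mp hi)]
  rw [hinner]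

theorem pv_main (S : List Int) (m : Int) (hm : m ≠ 0) :
    brute_force_3AP_count S m = brute_force_3AP_count_alt S m := by
  rw [pv_A_sum, pv_B_sum, Finset.sum_comm]
  refine Finset.sum_congr rfl fun jj hjj => ?_
  have hjn : jj < S.length := Finset.mem_range.mp hjj
  have hcount : ∀ v : Int, ((S.map (fun x => PySem.Int.mod x m)).count v : Int)
      = ∑ k ∈ Finset.range S.length, (if PySem.Int.mod (S.getD k 0) m = v then (1:Int) else 0) := by
    intro v
    rw [pv_count_eq_sum, List.length_map]
    exact Finset.sum_congr rfl fun k hk => by rw [pv_getD_map S _ k (Finset.mem_range.mp hk)]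
  have hcount2 : ∀ v : Int, ((S.map (fun x => PySem.Int.mod (2 * x) m)).count v : Int)
      = ∑ k ∈ Finset.range S.length, (if PySem.Int.mod (2 * S.getD k 0) m = v then (1:Int) else 0) := by
    intro v
    rw [pv_count_eq_sum, List.length_map]
    exact Finset.sum_congr rfl fun k hk => by rw [pv_getD_map S _ k (Finset.mem_range.mp hk)]
  have hmerge : (∑ i ∈ Finset.range S.length,
      (if ((jj : Nat) : Int) = ((i : Nat) : Int) then 0 else
        ∑ k ∈ Finset.range S.length,
          (if ((k : Nat) : Int) = ((i : Nat) : Int) ∨ ((k : Nat) : Int) = ((jj : Nat) : Int) then 0 else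
            if PySem.Int.mod (PySem.List.pyGetD S ((jj : Nat) : Int) 0 - PySem.List.pyGetD S ((i : Nat) : Int) 0) m
                = PySem.Int.mod (PySem.List.pyGetD S ((k : Nat) : Int) 0 - PySem.List.pyGetD S ((jj : Nat) : Int) 0) m
            then 1 else 0)))
    = ∑ i ∈ Finset.range S.length, ∑ k ∈ Finset.range S.length,
        (if i ≠ jj ∧ k ≠ i ∧ k ≠ jj ∧
            (PySem.Int.mod (S.getD jj 0 - S.getD i 0) m = PySem.Int.mod (S.getD k 0 - S.getD jj 0) m)
          then (1:Int) else 0) := by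
    simp only [PySem.List.pyGetD_natCast, Nat.cast_inj]
    refine Finset.sum_congr rfl fun i _ => ?_
    by_cases h : jj = i
    · simp [h]
    · rw [if_neg h]
      refine Finset.sum_congr rfl fun k _ => ?_
      by_cases h2 : k = i ∨ k = jj
      · rw [if_pos h2]
        rcases h2 with h2 | h2 <;> simp [h2]
      · rw [not_or] at h2
        rw [if_neg (by tauto)]
        exact if_congr ⟨fun hc => ⟨fun he => h he.symm, h2.1, h2.2, hc⟩,
          fun hc => hc.2.2.2⟩ rfl rfl
  rw [hmerge, pv_ie S.length jj hjn
    (fun i k => PySem.Int.mod (S.getD jj 0 - S.getD i 0) m = PySem.Int.mod (S.getD k 0 - S.getD jj 0) m) rfl]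
  have hE1 : (∑ i ∈ Finset.range S.length, ∑ k ∈ Finset.range S.length,
      (if PySem.Int.mod (S.getD jj 0 - S.getD i 0) m = PySem.Int.mod (S.getD k 0 - S.getD jj 0) m
        then (1:Int) else 0))
      = ∑ i ∈ Finset.range S.length,
          (((S.map (fun x => PySem.Int.mod x m)).count
              (PySem.Int.mod (PySem.Int.mod (2 * S.getD jj 0) m - PySem.Int.mod (S.getD i 0) m) m) : Nat) : Int) := by
    refine Finset.sum_congr rfl fun i _ => ?_
    rw [hcount]
    exact Finset.sum_congr rfl fun k _ =>
      if_congr (pv_iff_main m hm (S.getD i 0) (S.getD jj 0) (S.getD k 0)) rfl rfl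
  have hE2 : (∑ k ∈ Finset.range S.length,
      (if PySem.Int.mod (S.getD jj 0 - S.getD jj 0) m = PySem.Int.mod (S.getD k 0 - S.getD jj 0) m
        then (1:Int) else 0))
      = (((S.map (fun x => PySem.Int.mod x m)).count (PySem.Int.mod (S.getD jj 0) m) : Nat) : Int) := by
    rw [hcount]
    exact Finset.sum_congr rfl fun k _ =>
      if_congr (pv_iff_mid m hm (S.getD jj 0) (S.getD k 0)) rfl rfl
  have hE3 : (∑ i ∈ Finset.range S.length,
      (if PySem.Int.mod (S.getD jj 0 - S.getD i 0) m = PySem.Int.mod (S.getD jj 0 - S.getD jj 0) m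
        then (1:Int) else 0))
      = (((S.map (fun x => PySem.Int.mod x m)).count (PySem.Int.mod (S.getD jj 0) m) : Nat) : Int) := by
    rw [hcount]
    exact Finset.sum_congr rfl fun i _ =>
      if_congr (pv_iff_col m hm (S.getD i 0) (S.getD jj 0)) rfl rfl
  have hE4 : (∑ i ∈ Finset.range S.length,
      (if PySem.Int.mod (S.getD jj 0 - S.getD i 0) m = PySem.Int.mod (S.getD i 0 - S.getD jj 0) m
        then (1:Int) else 0))
      = (((S.map (fun x => PySem.Int.mod (2 * x) m)).count (PySem.Int.mod (2 * S.getD jj 0) m) : Nat) : Int) := by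
    rw [hcount2]
    exact Finset.sum_congr rfl fun i _ =>
      if_congr (pv_iff_diag m hm (S.getD i 0) (S.getD jj 0)) rfl rfl
  rw [hE1, hE2, hE3, hE4]
  ring

-- ===== VERDICT (by name: the statement is the Claim_ definition above) =====
theorem brute_force_3AP_count_spec : Claim_equal_brute_force_3AP_count := by
  intro S mod _ hpre
  unfold Spec_brute_force_3AP_count
  exact pv_main S mod hpre
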